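-- pv_equiv track=rewrite | github.com/windom/pysim | mux.py | mux
-- ===== SOURCE A (Python) =====
-- def mux(l):
--     def round(l):
--         return [a^b for a,b in zip(l[:-1], l[1:])]
--     nl = []
--     while l:
--         nl.append(l[0])
--         l = round(l)
--     return nl
-- ===== SOURCE B (Python) =====
-- def mux(l):
--     # Divide and conquer: after 2^m rounds of adjacent XOR, entry i is
--     # l[i] ^ l[i + 2^m]; so split at the largest power of two h < len(l):
--     # the first h outputs come from the prefix alone, the rest from the
--     # h-stride pairing. O(n log n) instead of A's O(n^2).
--     n = len(l)
--     if n <= 1: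
--         return list(l)
--     h = 1
--     while 2 * h < n:
--         h *= 2
--     rest = [l[i] ^ l[i + h] for i in range(n - h)]
--     return mux(l[:h]) + mux(rest)
-- ===== Notes on version B (the rewrite author's own statement) =====
-- stated objective: faster
-- what changed: Replaces the O(n^2) while-loop that recomputes the whole adjacent-XOR row each step with a divide-and-conquer split at the largest power of two h < n, using that 2^m rounds reduce to an h-stride XOR pairing.
import Mathlib
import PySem

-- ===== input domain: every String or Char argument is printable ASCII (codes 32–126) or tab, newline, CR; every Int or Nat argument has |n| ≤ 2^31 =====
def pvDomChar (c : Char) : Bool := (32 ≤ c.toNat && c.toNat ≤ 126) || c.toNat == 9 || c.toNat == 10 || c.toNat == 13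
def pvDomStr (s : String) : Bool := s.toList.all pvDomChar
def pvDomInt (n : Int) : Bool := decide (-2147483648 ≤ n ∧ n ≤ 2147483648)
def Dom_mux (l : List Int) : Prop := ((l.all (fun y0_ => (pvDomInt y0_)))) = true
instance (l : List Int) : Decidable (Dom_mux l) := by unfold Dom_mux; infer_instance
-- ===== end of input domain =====

-- B replaces A's O(n^2) repeated adjacent-XOR rounds by an O(n log n) divide-and-conquer
-- split at the largest power of two h < n (objective: faster, asymptotically).

-- ===== PORT A =====
-- round(l) = [a^b for a,b in zip(l[:-1], l[1:])]
def pyRound (l : List Int) : List Int :=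
  (List.zip (PySem.List.slice l none (some (-1))) (PySem.List.slice l (some 1) none)).map
    (fun ab => PySem.Int.bxor ab.1 ab.2)

lemma pyRound_length_lt (l : List Int) (h : l ≠ []) : (pyRound l).length < l.length := by
  cases l with
  | nil => exact absurd rfl h
  | cons a t =>
    simp [pyRound, PySem.List.slice_to_neg_one, PySem.List.slice_from_one]

-- while l: nl.append(l[0]); l = round(l)
def muxLoop (l : List Int) (nl : List Int) : List Int :=
  if hl : l = [] then nl
  else muxLoop (pyRound l) (nl ++ [l.head hl])
termination_by l.length
decreasing_by exact pyRound_length_lt l hl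

def mux (l : List Int) : List Int := muxLoop l []

-- ===== PORT B =====
-- h = 1; while 2*h < n: h *= 2   (the 0 < h conjunct only makes the recursion total;
-- at the call site h = 1 so it always holds)
def muxHalf (n h : Nat) : Nat :=
  if hc : 2 * h < n ∧ 0 < h then muxHalf n (2 * h) else h
termination_by n - h
decreasing_by omega

lemma muxHalf_bounds (n h : Nat) (h0 : 0 < h) (hn : h < n) :
    0 < muxHalf n h ∧ muxHalf n h < n := by
  fun_induction muxHalf n h with
  | case1 h hc ih => exact ih (by omega) (by omega)
  | case2 h hc => exact ⟨h0, hn⟩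

def mux_alt (l : List Int) : List Int :=
  if l.length ≤ 1 then l
  else
    let h := muxHalf l.length 1
    mux_alt (List.take h l) ++
      mux_alt ((List.range (l.length - h)).map
        -- indices i and i + h are in range, so Python's l[i]/l[i+h] is total here
        (fun i => PySem.Int.bxor (l.getD i 0) (l.getD (i + h) 0)))
termination_by l.length
decreasing_by
  · have := muxHalf_bounds l.length 1 (by omega) (by omega)
    simp only [List.length_take]
    omega
  · have := muxHalf_bounds l.length 1 (by omega) (by omega)
    simp only [List.length_map, List.length_range]
    omega

-- ===== PRECONDITION & SPEC =====
def Spec_mux (l : List Int) (out : List Int) : Prop := out = mux_alt l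
instance (l : List Int) (out : List Int) : Decidable (Spec_mux l out) := by unfold Spec_mux; infer_instance

-- ===== CLAIM (what is proved, stated in full; the proofs are below) =====
def Claim_equal_mux : Prop := ∀ (l : List Int), Dom_mux l → Spec_mux l (mux l)

-- ===== LEMMAS AND PROOFS =====

lemma pvXorCancel (a b c : Int) :
    PySem.Int.bxor (PySem.Int.bxor a b) (PySem.Int.bxor b c) = PySem.Int.bxor a c := by
  have hnat : ∀ x y z : Nat, (x ^^^ y) ^^^ (y ^^^ z) = x ^^^ z := by
    intro x y z
    rw [Nat.xor_assoc, ← Nat.xor_assoc y y, Nat.xor_self, Nat.zero_xor]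
  unfold PySem.Int.bxor
  rcases le_or_gt 0 a with ha | ha <;> rcases le_or_gt 0 b with hb | hb <;>
    rcases le_or_gt 0 c with hc | hc <;>
      simp only [if_pos, if_false, ha, hb, hc, not_le.mpr, hnat,
        show ∀ x : Nat, 0 ≤ (x:Int) from fun x => Int.natCast_nonneg x,
        show ∀ x : Nat, ¬ (0 ≤ -(x:Int) - 1) from fun x => by omega,
        Int.toNat_natCast,
        show ∀ x : Nat, (-(-(x:Int) - 1) - 1).toNat = x from fun x => by omega]

-- h-stride pairing: zipWith xor l (l.drop h)
def pairh (l : List Int) (h : Nat) : List Int :=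
  List.zipWith (fun a b => PySem.Int.bxor a b) l (l.drop h)

lemma length_pairh (l : List Int) (h : Nat) : (pairh l h).length = l.length - h := by
  simp [pairh]

lemma getElem_pairh (l : List Int) (h i : Nat) (hi : i < (pairh l h).length) :
    (pairh l h)[i] =
      PySem.Int.bxor (l[i]'(by have := length_pairh l h; omega))
        (l[i + h]'(by have := length_pairh l h; omega)) := by
  have hc : h + i = i + h := Nat.add_comm h i
  simp only [pairh, List.getElem_zipWith, List.getElem_drop, hc]

lemma pyRound_eq_pairh (l : List Int) : pyRound l = pairh l 1 := by
  apply List.ext_getElem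
  · simp [pyRound, PySem.List.slice_to_neg_one, PySem.List.slice_from_one, length_pairh]
  · intro i h1 h2
    have hl := length_pairh l 1
    rw [getElem_pairh]
    simp [pyRound, PySem.List.slice_to_neg_one, PySem.List.slice_from_one,
      List.getElem_zip, List.getElem_dropLast, List.getElem_tail]

lemma pairh_pairh (l : List Int) (h : Nat) :
    pairh (pairh l h) h = pairh l (2 * h) := by
  apply List.ext_getElem
  · simp [length_pairh]; omega
  · intro i h1 h2
    rw [getElem_pairh, getElem_pairh, getElem_pairh, getElem_pairh]
    have e : i + h + h = i + 2 * h := by omega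
    rw [show (l[i + h + h]'(by simp [length_pairh] at h1 ⊢; omega)) =
        (l[i + 2 * h]'(by simp [length_pairh] at h1 ⊢; omega)) from by congr 1]
    exact pvXorCancel _ _ _

lemma iter_pow (m : Nat) (l : List Int) : pyRound^[2 ^ m] l = pairh l (2 ^ m) := by
  induction m generalizing l with
  | zero => simpa using pyRound_eq_pairh l
  | succ m ih =>
    have : (2 : Nat) ^ (m + 1) = 2 ^ m + 2 ^ m := by ring
    rw [this, Function.iterate_add_apply, ih, ih, pairh_pairh]
    congr 1
    omega

-- structural version of A's loop
def muxA (l : List Int) : List Int :=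
  if hl : l = [] then [] else l.head hl :: muxA (pyRound l)
termination_by l.length
decreasing_by exact pyRound_length_lt l hl

lemma muxA_nil : muxA [] = [] := by simp [muxA]

lemma muxA_cons (l : List Int) (hl : l ≠ []) :
    muxA l = l.head hl :: muxA (pyRound l) := by
  rw [muxA]; simp [hl]

lemma muxLoop_eq (l : List Int) : ∀ nl, muxLoop l nl = nl ++ muxA l := by
  fun_induction muxA l with
  | case1 => intro nl; rw [muxLoop]; simp
  | case2 l hl ih =>
    intro nl
    rw [muxLoop]
    simp only [dif_neg hl]
    rw [ih]
    simp

lemma pyRound_take (l : List Int) (m : Nat) :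
    pyRound (l.take m) = (pyRound l).take (m - 1) := by
  rw [pyRound_eq_pairh, pyRound_eq_pairh]
  apply List.ext_getElem
  · simp [length_pairh]; omega
  · intro i h1 h2
    rw [List.getElem_take, getElem_pairh, getElem_pairh]
    simp [List.getElem_take]

lemma muxA_take (l : List Int) : ∀ m, muxA (l.take m) = (muxA l).take m := by
  fun_induction muxA l with
  | case1 => intro m; simp [muxA_nil]
  | case2 l hl ih =>
    intro m
    cases m with
    | zero => simp [muxA_nil]
    | succ m =>
      have ht : l.take (m + 1) ≠ [] := by
        cases l with
        | nil => exact absurd rfl hl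
        | cons a t => simp
      rw [muxA_cons _ ht, pyRound_take]
      simp only [Nat.add_sub_cancel]
      rw [ih]
      cases l with
      | nil => exact absurd rfl hl
      | cons a t => simp [List.take_succ_cons]

lemma iter_nil (k : Nat) : pyRound^[k] ([] : List Int) = [] := by
  induction k with
  | zero => rfl
  | succ k ih => rw [Function.iterate_succ_apply, show pyRound [] = [] from rfl, ih]

lemma muxA_drop (k : Nat) : ∀ l : List Int, (muxA l).drop k = muxA (pyRound^[k] l) := by
  induction k with
  | zero => simp
  | succ k ih =>
    intro l
    by_cases hl : l = []
    · subst hl; rw [iter_nil, muxA_nil]; simp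
    · rw [muxA_cons l hl, Function.iterate_succ_apply, List.drop_succ_cons]
      exact ih (pyRound l)

lemma pairh_eq_rangeMap (l : List Int) (h : Nat) :
    pairh l h = (List.range (l.length - h)).map
      (fun i => PySem.Int.bxor (l.getD i 0) (l.getD (i + h) 0)) := by
  apply List.ext_getElem
  · simp [length_pairh]
  · intro i h1 h2
    rw [getElem_pairh]
    have hl := length_pairh l h
    simp only [List.getElem_map, List.getElem_range]
    rw [List.getD_eq_getElem, List.getD_eq_getElem]

lemma muxHalf_pow (n h : Nat) : (∃ m, h = 2 ^ m) → ∃ m, muxHalf n h = 2 ^ m := by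
  fun_induction muxHalf n h with
  | case1 h hc ih =>
    rintro ⟨m, rfl⟩
    exact ih ⟨m + 1, by ring⟩
  | case2 h hc => exact id

lemma mux_alt_unfold (l : List Int) (h1 : ¬ l.length ≤ 1) :
    mux_alt l = mux_alt (List.take (muxHalf l.length 1) l) ++
      mux_alt ((List.range (l.length - muxHalf l.length 1)).map
        (fun i => PySem.Int.bxor (l.getD i 0) (l.getD (i + muxHalf l.length 1) 0))) := by
  rw [mux_alt]
  simp [h1]

lemma muxA_eq_alt (l : List Int) : muxA l = mux_alt l := by
  induction hn : l.length using Nat.strong_induction_on generalizing l with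
  | _ n ih =>
    subst hn
    by_cases h1 : l.length ≤ 1
    · rw [mux_alt, if_pos h1]
      cases l with
      | nil => exact muxA_nil
      | cons a t =>
        have ht : t = [] := by cases t <;> simp_all
        subst ht
        rw [muxA_cons _ (by simp)]
        simp [show pyRound [a] = [] from rfl, muxA_nil]
    · rw [mux_alt_unfold l h1]
      have hb := muxHalf_bounds l.length 1 (by omega) (by omega)
      obtain ⟨m, hm⟩ := muxHalf_pow l.length 1 ⟨0, rfl⟩
      set h := muxHalf l.length 1 with hh
      have hsplit : muxA l = (muxA l).take h ++ (muxA l).drop h :=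
        (List.take_append_drop h (muxA l)).symm
      rw [hsplit, ← muxA_take, muxA_drop, hm, iter_pow, ← hm]
      rw [← pairh_eq_rangeMap]
      congr 1
      · exact ih (l.take h).length (by simp; omega) _ rfl
      · exact ih (pairh l h).length (by rw [length_pairh]; omega) _ rfl

-- ===== VERDICT (by name: the statement is the Claim_ definition above) =====
theorem mux_spec : Claim_equal_mux := by
  intro l _
  unfold Spec_mux mux
  rw [muxLoop_eq, List.nil_append, muxA_eq_alt]
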